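-- pv_equiv track=rewrite | github.com/ggulcy/EggMoney | domain/services/bot_factory.py | assign_levels_to_tickers
-- ===== SOURCE A (Python) =====
-- from typing import Dict, List, Any
--
-- def assign_levels_to_tickers(ticker_allocations: List[Dict[str, Any]],
--                              level_counts: Dict[int, int]) -> Dict[str, List[int]]:
--     """티커별 봇들에게 레벨 배정
--
--     전략:
--     - 높은 레벨(공격적)부터 우선가중치 높은 티커에 배정
--     - 각 티커 내에서도 다양한 레벨 분산
--     """
--
--     # 레벨을 높은 순으로 정렬 (4 -> 1)
--     sorted_levels = sorted(level_counts.keys(), reverse=True)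
--
--     # 티커별 봇 레벨 리스트
--     ticker_bot_levels = {t["ticker"]: [] for t in ticker_allocations}
--
--     # 전체 레벨에 걸쳐 순환 배정을 위한 ticker_idx
--     ticker_idx = 0
--
--     # 각 레벨의 봇들을 티커에 분배
--     for level in sorted_levels:
--         count = level_counts[level]
--
--         # 이 레벨의 봇들을 티커에 순환 배정
--         for _ in range(count):
--             ticker = ticker_allocations[ticker_idx]["ticker"]
--             ticker_bot_levels[ticker].append(level)
--
--             # 다음 티커로 (순환)
--             ticker_idx = (ticker_idx + 1) % len(ticker_allocations)
--
--     # 각 티커 내에서 레벨 정렬 (높은 레벨 먼저)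
--     for ticker in ticker_bot_levels:
--         ticker_bot_levels[ticker].sort(reverse=True)
--
--     return ticker_bot_levels
-- ===== SOURCE B (Python) =====
-- def assign_levels_to_tickers(ticker_allocations, level_counts):
--     """Gather formulation: build the flat descending bot-level list once; the bot at
--     position i belongs to ticker position i % n, so each ticker's levels are read off
--     directly by filtering flat by position residue (no cyclic index, no mutation)."""
--     flat = [lvl for lvl in sorted(level_counts, reverse=True)
--                 for _ in range(level_counts[lvl])]
--     names = [t["ticker"] for t in ticker_allocations]
--     n = len(names)
--     return {name: sorted((lvl for i, lvl in enumerate(flat) if names[i % n] == name),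
--                          reverse=True)
--             for name in names}
-- ===== Notes on version B (the rewrite author's own statement) =====
-- stated objective: alternative
-- what changed: Replaces A's stateful scatter (round-robin dealing with a cyclic ticker index into a pre-built mutable dict) by a gather: build the flat descending level list once and compute each ticker's level list directly as a filter of that list by position residue, sorted at construction.
import Mathlib
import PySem

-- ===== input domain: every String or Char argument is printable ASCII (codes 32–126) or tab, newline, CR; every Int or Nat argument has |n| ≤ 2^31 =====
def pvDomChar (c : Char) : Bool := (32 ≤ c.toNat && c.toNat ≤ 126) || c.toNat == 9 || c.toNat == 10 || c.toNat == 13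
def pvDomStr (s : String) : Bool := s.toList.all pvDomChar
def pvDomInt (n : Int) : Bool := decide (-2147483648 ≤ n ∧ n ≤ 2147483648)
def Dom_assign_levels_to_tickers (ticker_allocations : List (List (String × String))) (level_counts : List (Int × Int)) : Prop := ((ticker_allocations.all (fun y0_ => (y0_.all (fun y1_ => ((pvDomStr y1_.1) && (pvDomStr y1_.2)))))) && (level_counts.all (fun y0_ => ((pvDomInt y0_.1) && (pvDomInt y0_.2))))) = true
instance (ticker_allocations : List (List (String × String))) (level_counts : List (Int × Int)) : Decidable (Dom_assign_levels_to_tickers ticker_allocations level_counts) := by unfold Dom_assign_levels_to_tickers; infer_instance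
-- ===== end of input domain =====

-- B replaces A's stateful round-robin scatter (cyclic index into a mutable dict) by a gather:
-- it builds the flat descending level list once and computes each ticker's levels directly by
-- filtering that list by position residue (objective: alternative decomposition, not faster).

-- ===== PORT A =====
-- t["ticker"] (shared by both Pythons); default "" is never used under Pre_
def pvNameOf (t : List (String × String)) : String :=
  (PySem.Dict.ofList t).getD "ticker" ""

-- the body of A's inner round-robin loop (state = (ticker_bot_levels, ticker_idx))
def pvStepA (ticker_allocations : List (List (String × String)))
    (s : PySem.Dict String (List Int) × Int) (level : Int) :
    PySem.Dict String (List Int) × Int :=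
  let ticker := pvNameOf (PySem.List.pyGetD ticker_allocations s.2 [])
  (s.1.modify ticker [] (fun v => v ++ [level]),
   PySem.Int.mod (s.2 + 1) (PySem.List.len ticker_allocations))

def assign_levels_to_tickers (ticker_allocations : List (List (String × String))) (level_counts : List (Int × Int)) : List (String × List Int) :=
  let lc : PySem.Dict Int Int := PySem.Dict.ofList level_counts
  let sorted_levels := PySem.List.sorted lc.keys (fun x => x) true
  let ticker_bot_levels : PySem.Dict String (List Int) :=
    ticker_allocations.foldl (fun d t => d.insert (pvNameOf t) ([] : List Int)) PySem.Dict.empty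
  let st :=
    sorted_levels.foldl
      (fun s level =>
        let count := lc.getD level 0
        (PySem.List.pyRange 0 count 1).foldl (fun s _ => pvStepA ticker_allocations s level) s)
      (ticker_bot_levels, (0 : Int))
  st.1.items.map (fun kv => (kv.1, PySem.List.sorted kv.2 (fun x => x) true))

-- ===== PORT B =====
-- the value of B's dict comprehension for one ticker name
def pvValB (names : List String) (flat : List Int) (n : Int) (name : String) : List Int :=
  PySem.List.sorted
    (((PySem.List.enumerate flat).filter
        (fun p => PySem.List.pyGetD names (PySem.Int.mod p.1 n) "" == name)).map (fun p => p.2))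
    (fun x => x) true

def assign_levels_to_tickers_alt (ticker_allocations : List (List (String × String))) (level_counts : List (Int × Int)) : List (String × List Int) :=
  let lc : PySem.Dict Int Int := PySem.Dict.ofList level_counts
  let flat : List Int :=
    (PySem.List.sorted lc.keys (fun x => x) true).flatMap
      (fun lvl => (PySem.List.pyRange 0 (lc.getD lvl 0) 1).map (fun _ => lvl))
  let names := ticker_allocations.map pvNameOf
  let n : Int := PySem.List.len names
  (names.foldl (fun d name => d.insert name (pvValB names flat n name)) PySem.Dict.empty).items

-- ===== PRECONDITION & SPEC =====
-- Pre_ excludes exactly the inputs on which the Python A raises: some ticker dict without a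
-- "ticker" key (KeyError), and empty ticker_allocations with some positive level count (IndexError).
def Pre_assign_levels_to_tickers (ticker_allocations : List (List (String × String))) (level_counts : List (Int × Int)) : Prop :=
  (∀ t ∈ ticker_allocations, "ticker" ∈ t.map Prod.fst) ∧
  (ticker_allocations = [] → ∀ v ∈ (PySem.Dict.ofList level_counts).values, v ≤ 0)
instance (ticker_allocations : List (List (String × String))) (level_counts : List (Int × Int)) : Decidable (Pre_assign_levels_to_tickers ticker_allocations level_counts) := by unfold Pre_assign_levels_to_tickers; infer_instance

def pvWitness_assign_levels_to_tickers : (List (List (String × String))) × (List (Int × Int)) :=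
  ([[("ticker", "AAPL")], [("ticker", "MSFT")]], [(1, 2), (2, 3)])

def Spec_assign_levels_to_tickers (ticker_allocations : List (List (String × String))) (level_counts : List (Int × Int)) (out : List (String × List Int)) : Prop := out = assign_levels_to_tickers_alt ticker_allocations level_counts
instance (ticker_allocations : List (List (String × String))) (level_counts : List (Int × Int)) (out : List (String × List Int)) : Decidable (Spec_assign_levels_to_tickers ticker_allocations level_counts out) := by unfold Spec_assign_levels_to_tickers; infer_instance

-- ===== CLAIM (what is proved, stated in full; the proofs are below) =====
def Claim_equal_assign_levels_to_tickers : Prop := ∀ (ticker_allocations : List (List (String × String))) (level_counts : List (Int × Int)), Dom_assign_levels_to_tickers ticker_allocations level_counts → Pre_assign_levels_to_tickers ticker_allocations level_counts → Spec_assign_levels_to_tickers ticker_allocations level_counts (assign_levels_to_tickers ticker_allocations level_counts)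


-- ===== LEMMAS AND PROOFS =====

-- the levels A's round-robin loop hands to ticker name k, scanning the flat list fs from
-- absolute bot position a (order preserved)
def pvPick (tas : List (List (String × String))) : List Int → Nat → String → List Int
  | [], _, _ => []
  | x :: xs, a, k =>
    (if (tas.map pvNameOf).getD (a % tas.length) "" = k then [x] else []) ++ pvPick tas xs (a + 1) k

lemma pv_mod_succ (a n : Nat) : (a % n + 1) % n = (a + 1) % n := by
  conv_lhs => rw [Nat.add_mod]
  conv_rhs => rw [Nat.add_mod]
  rw [Nat.mod_mod a n]

lemma pvStepA_eq (tas : List (List (String × String))) (a : Nat) (ha : a < tas.length)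
    (d : PySem.Dict String (List Int)) (level : Int) :
    pvStepA tas (d, ((a : Nat) : Int)) level
      = (d.modify ((tas.map pvNameOf).getD a "") [] (fun v => v ++ [level]),
         (((a + 1) % tas.length : Nat) : Int)) := by
  unfold pvStepA
  have h1 : ((a : Int) + 1) = ((a + 1 : Nat) : Int) := by push_cast; ring
  simp only [PySem.List.pyGetD_natCast, PySem.List.len_eq, h1, PySem.Int.mod_natCast]
  congr 2
  · rw [List.getD_eq_getElem tas [] ha, List.getD_eq_getElem _ "" (by simpa using ha)]
    simp

lemma pvA_fold_getD (tas : List (List (String × String))) (k : String) :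
    ∀ (fs : List Int) (a : Nat) (d : PySem.Dict String (List Int)), 0 < tas.length →
      ((fs.foldl (pvStepA tas) (d, ((a % tas.length : Nat) : Int))).1).getD k []
        = d.getD k [] ++ pvPick tas fs a k := by
  intro fs
  induction fs with
  | nil => intro a d h; simp [pvPick]
  | cons x xs ih =>
    intro a d h
    rw [List.foldl_cons, pvStepA_eq tas (a % tas.length) (Nat.mod_lt a h) d x,
        pv_mod_succ a tas.length, ih (a + 1) _ h]
    rw [PySem.Dict.getD_modify]
    have hp : pvPick tas (x :: xs) a k
        = (if (tas.map pvNameOf).getD (a % tas.length) "" = k then [x] else [])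
          ++ pvPick tas xs (a + 1) k := rfl
    rw [hp]
    by_cases hk : (tas.map pvNameOf).getD (a % tas.length) "" = k
    · rw [if_pos hk.symm, if_pos hk, hk, List.append_assoc]
    · rw [if_neg (fun h => hk h.symm), if_neg hk, List.nil_append]

lemma pvA_fold_keys (tas : List (List (String × String))) :
    ∀ (fs : List Int) (a : Nat) (d : PySem.Dict String (List Int)), 0 < tas.length →
      (∀ x ∈ tas.map pvNameOf, x ∈ d.keys) →
      ((fs.foldl (pvStepA tas) (d, ((a % tas.length : Nat) : Int))).1).keys = d.keys := by
  intro fs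
  induction fs with
  | nil => intro a d h hk; simp
  | cons x xs ih =>
    intro a d h hk
    have hmem : (tas.map pvNameOf).getD (a % tas.length) "" ∈ tas.map pvNameOf := by
      rw [List.getD_eq_getElem _ "" (by simpa using Nat.mod_lt a h)]
      exact List.getElem_mem _
    have hcont : d.contains ((tas.map pvNameOf).getD (a % tas.length) "") = true := by
      rw [PySem.Dict.contains_iff_mem_keys]
      exact hk _ hmem
    have hkeys : (d.modify ((tas.map pvNameOf).getD (a % tas.length) "") []
        (fun v => v ++ [x])).keys = d.keys := by
      rw [PySem.Dict.keys_modify, PySem.Dict.keys_insert_of_contains _ _ hcont]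
    rw [List.foldl_cons, pvStepA_eq tas (a % tas.length) (Nat.mod_lt a h) d x,
        pv_mod_succ a tas.length, ih (a + 1) _ h (by rw [hkeys]; exact hk), hkeys]

lemma pvD0_keys (tas : List (List (String × String))) :
    (tas.foldl (fun d t => d.insert (pvNameOf t) ([] : List Int)) PySem.Dict.empty).keys
      = PySem.Set.ofList (tas.map pvNameOf) := by
  rw [PySem.Dict.keys_foldl_insert_key tas pvNameOf (fun _ _ => ([] : List Int)) PySem.Dict.empty]
  simp [PySem.Dict.keys_empty, PySem.Set.update_nil_left]

lemma pvD0_getD (tas : List (List (String × String))) :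
    ∀ (d : PySem.Dict String (List Int)), (∀ k, d.getD k [] = ([] : List Int)) →
      ∀ k, (tas.foldl (fun d t => d.insert (pvNameOf t) ([] : List Int)) d).getD k [] = [] := by
  induction tas with
  | nil => intro d h k; exact h k
  | cons t ts ih =>
    intro d h k
    rw [List.foldl_cons]
    exact ih _ (fun k' => by rw [PySem.Dict.getD_insert]; split_ifs with h' <;> simp [h k']) k

lemma pvBdict_getD (val : String → List Int) :
    ∀ (l : List String) (d : PySem.Dict String (List Int)) (k : String),
      (l.foldl (fun d name => d.insert name (val name)) d).getD k []
        = if k ∈ l then val k else d.getD k [] := by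
  intro l
  induction l with
  | nil => intro d k; simp
  | cons a l ih =>
    intro d k
    rw [List.foldl_cons, ih]
    by_cases hl : k ∈ l
    · simp [hl]
    · rw [if_neg hl, PySem.Dict.getD_insert]
      by_cases hk : k = a
      · simp [hk]
      · simp [hk, hl]

lemma pvBdict_keys (val : String → List Int) (l : List String) :
    (l.foldl (fun d name => d.insert name (val name)) PySem.Dict.empty).keys
      = PySem.Set.ofList l := by
  rw [PySem.Dict.keys_foldl_insert_key l (fun x => x) (fun _ name => val name) PySem.Dict.empty]
  simp [PySem.Dict.keys_empty, PySem.Set.update_nil_left]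

lemma pvFoldl_blocks {σ : Type} (g : σ → Int → σ) (blk : Int → List Int) :
    ∀ (levels : List Int) (s : σ),
      levels.foldl (fun s lvl => (blk lvl).foldl g s) s = (levels.flatMap blk).foldl g s := by
  intro levels
  induction levels with
  | nil => intro s; simp
  | cons a l ih => intro s; simp [List.foldl_append, ih]

lemma pvValB_inner (tas : List (List (String × String))) (k : String) :
    ∀ (fs : List Int) (a : Nat),
      ((PySem.List.enumerate fs ((a : Nat) : Int)).filter
          (fun p => PySem.List.pyGetD (tas.map pvNameOf)
              (PySem.Int.mod p.1 (PySem.List.len (tas.map pvNameOf))) "" == k)).map (fun p => p.2)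
        = pvPick tas fs a k := by
  intro fs
  induction fs with
  | nil => intro a; simp [PySem.List.enumerate_nil, pvPick]
  | cons x xs ih =>
    intro a
    have h1 : ((a : Int) + 1) = ((a + 1 : Nat) : Int) := by push_cast; ring
    rw [PySem.List.enumerate_cons, h1, List.filter_cons]
    have h2 : (PySem.List.pyGetD (tas.map pvNameOf)
        (PySem.Int.mod ((a : Nat) : Int) (PySem.List.len (tas.map pvNameOf))) "" == k)
        = decide ((tas.map pvNameOf).getD (a % tas.length) "" = k) := by
      simp only [PySem.List.len_eq, PySem.Int.mod_natCast, PySem.List.pyGetD_natCast,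
        List.length_map]
      exact Bool.beq_eq_decide_eq _ _
    have hp : pvPick tas (x :: xs) a k
        = (if (tas.map pvNameOf).getD (a % tas.length) "" = k then [x] else [])
          ++ pvPick tas xs (a + 1) k := rfl
    rw [h2, hp]
    by_cases hk : (tas.map pvNameOf).getD (a % tas.length) "" = k
    · simp only [hk, decide_true, if_true, List.map_cons, ih (a + 1)]
      simp
    · simp only [hk, decide_false, Bool.false_eq_true, if_false, ih (a + 1), List.nil_append]

-- ===== VERDICT (by name: the statement is the Claim_ definition above) =====
lemma pv_count_nonpos (lcs : List (Int × Int))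
    (hpre : ∀ v ∈ (PySem.Dict.ofList lcs).values, v ≤ 0) (lvl : Int) :
    (PySem.Dict.ofList lcs).getD lvl 0 ≤ 0 := by
  cases hq : (PySem.Dict.ofList lcs).get? lvl with
  | none => rw [PySem.Dict.getD_eq_get?_getD, hq]; simp
  | some v =>
    rw [PySem.Dict.getD_eq_get?_getD, hq]
    have hmem := PySem.Dict.mem_items_of_get?_eq_some _ hq
    refine hpre v ?_
    simp only [PySem.Dict.values]
    exact List.mem_map.mpr ⟨(lvl, v), hmem, rfl⟩

theorem assign_levels_to_tickers_spec : Claim_equal_assign_levels_to_tickers := by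
  intro tas lcs _ hpre
  unfold Spec_assign_levels_to_tickers
  unfold assign_levels_to_tickers assign_levels_to_tickers_alt
  simp only [PySem.List.len_eq, List.length_map]
  cases tas with
  | nil =>
    simp only [List.foldl_nil, List.map_nil]
    have hcong : ∀ lvl ∈ PySem.List.sorted (PySem.Dict.ofList lcs).keys (fun x => x) true,
        ∀ (s : PySem.Dict String (List Int) × Int),
        (PySem.List.pyRange 0 ((PySem.Dict.ofList lcs).getD lvl 0) 1).foldl
          (fun s _ => pvStepA [] s lvl) s = s := by
      intro lvl _ s
      rw [PySem.List.pyRange_one_eq_nil (by simpa using pv_count_nonpos lcs (hpre.2 rfl) lvl)]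
      rfl
    rw [PySem.List.foldl_congr_mem' _ _ (fun s _ => s) _ hcong, PySem.List.foldl_ignore]
    simp [PySem.Dict.empty]
  | cons t ts =>
    set tas := t :: ts with htas
    have hn : 0 < tas.length := by simp [htas]
    set lc := PySem.Dict.ofList lcs with hlc
    set names := tas.map pvNameOf with hnames
    set blk : Int → List Int :=
      fun lvl => (PySem.List.pyRange 0 (lc.getD lvl 0) 1).map (fun _ => lvl) with hblk
    set flat := (PySem.List.sorted lc.keys (fun x => x) true).flatMap blk with hflat
    set d0 := tas.foldl (fun d t => d.insert (pvNameOf t) ([] : List Int)) PySem.Dict.empty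
      with hd0
    -- flatten A's nested loop into one fold over flat
    have houter : (PySem.List.sorted lc.keys (fun x => x) true).foldl
        (fun s lvl => (PySem.List.pyRange 0 (lc.getD lvl 0) 1).foldl
          (fun s _ => pvStepA tas s lvl) s) (d0, (0 : Int))
        = flat.foldl (pvStepA tas) (d0, (0 : Int)) := by
      rw [hflat, ← pvFoldl_blocks (pvStepA tas) blk]
      congr 1
      funext s lvl
      rw [hblk, List.foldl_map]
    have h0 : (((0 % tas.length : Nat)) : Int) = (0 : Int) := by simp
    have hsub : ∀ x ∈ names, x ∈ d0.keys := by
      rw [hd0, pvD0_keys]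
      intro x hx
      rw [PySem.Set.mem_ofList]
      exact hx
    have hK : (flat.foldl (pvStepA tas) (d0, (0 : Int))).1.keys = PySem.Set.ofList names := by
      have := pvA_fold_keys tas flat 0 d0 hn hsub
      rw [h0] at this
      rw [this, hd0, pvD0_keys]
    have hG : ∀ k, (flat.foldl (pvStepA tas) (d0, (0 : Int))).1.getD k []
        = pvPick tas flat 0 k := by
      intro k
      have := pvA_fold_getD tas k flat 0 d0 hn
      rw [h0] at this
      rw [this, hd0, pvD0_getD tas PySem.Dict.empty (fun k' => by simp) k, List.nil_append]
    have hnd : (flat.foldl (pvStepA tas) (d0, (0 : Int))).1.keys.Nodup := by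
      rw [hK]; exact PySem.Set.nodup_ofList names
    have hitemsA := PySem.Dict.items_eq_map_keys _ hnd ([] : List Int)
    -- B side
    have hKB := pvBdict_keys (fun nm => pvValB names flat ((tas.length : Nat) : Int) nm) names
    have hndB : (names.foldl (fun d nm =>
        d.insert nm (pvValB names flat ((tas.length : Nat) : Int) nm))
        PySem.Dict.empty).keys.Nodup := by
      rw [hKB]; exact PySem.Set.nodup_ofList names
    have hitemsB := PySem.Dict.items_eq_map_keys _ hndB ([] : List Int)
    rw [houter, hitemsA, hitemsB, hK, hKB, List.map_map]
    apply List.map_eq_map_iff.mpr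
    intro k hk
    have hkn : k ∈ names := by
      rw [PySem.Set.mem_ofList] at hk
      exact hk
    have hvB : (names.foldl (fun nm_d nm =>
        nm_d.insert nm (pvValB names flat ((tas.length : Nat) : Int) nm))
        PySem.Dict.empty).getD k []
        = pvValB names flat ((tas.length : Nat) : Int) k := by
      rw [pvBdict_getD (fun nm => pvValB names flat ((tas.length : Nat) : Int) nm)
        names PySem.Dict.empty k, if_pos hkn]
    simp only [Function.comp_apply, hG, hvB]
    unfold pvValB
    have hinner := pvValB_inner tas k flat 0
    simp only [Nat.cast_zero] at hinner
    rw [PySem.List.len_eq, List.length_map, ← hnames] at hinner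
    rw [hinner]
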